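-- pv_equiv track=rewrite | github.com/BoilTask/DataTable | DataTable/Tool/datatable/parse.py | get_data_type_real
-- ===== SOURCE A (Python) =====
-- def get_data_type_real(data_type):
--     if data_type == "bit":
--         return "int32:bit()"
--
--     index_l = data_type.find("[")
--     index_r = data_type.rfind("]")
--     if index_l >= 0 and index_r >= 0 and index_r - index_l > 1:
--         return get_data_type_real(data_type[:index_l + 1] + data_type[index_r:])
--
--     return data_type
-- ===== SOURCE B (Python) =====
-- def get_data_type_real(data_type):
--     if data_type == "bit":
--         return "int32:bit()"
--
--     # single left-to-right scan: first '[' and last ']' positions (-1 if absent)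
--     l = -1
--     r = -1
--     for i, ch in enumerate(data_type):
--         if ch == '[' and l < 0:
--             l = i
--         if ch == ']':
--             r = i
--
--     if l >= 0 and r - l > 1:
--         return data_type[:l + 1] + data_type[r:]
--     return data_type
-- ===== Notes on version B (the rewrite author's own statement) =====
-- stated objective: alternative
-- what changed: Replaces A's tail recursion driven by find()/rfind() with a single explicit left-to-right scan that records the first '[' and last ']' positions, then builds the collapsed string once with no recursion.
import Mathlib
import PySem

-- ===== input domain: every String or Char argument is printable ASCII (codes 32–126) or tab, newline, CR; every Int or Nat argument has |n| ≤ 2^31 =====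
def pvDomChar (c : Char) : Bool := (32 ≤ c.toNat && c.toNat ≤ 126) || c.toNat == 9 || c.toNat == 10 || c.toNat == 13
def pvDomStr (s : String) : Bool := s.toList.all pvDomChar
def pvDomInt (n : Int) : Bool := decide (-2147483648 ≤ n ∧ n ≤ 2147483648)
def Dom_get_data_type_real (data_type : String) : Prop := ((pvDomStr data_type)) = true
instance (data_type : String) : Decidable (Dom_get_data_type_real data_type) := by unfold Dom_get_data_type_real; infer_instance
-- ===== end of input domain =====

-- B replaces A's find/rfind-driven tail recursion by one explicit scan recording the first '['
-- and last ']' followed by a single non-recursive collapse (objective: alternative, same cost).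

-- first index of c in s (else -1); proof-side characterisation, also cited by A's termination
def pvFirst (c : Char) : List Char → Int
  | [] => -1
  | a :: t => if a = c then 0 else (if 0 ≤ pvFirst c t then pvFirst c t + 1 else -1)

-- last index of c in s (else -1)
def pvLast (c : Char) : List Char → Int
  | [] => -1
  | a :: t => if 0 ≤ pvLast c t then pvLast c t + 1 else if a = c then 0 else -1

lemma pvFirst_cases (c : Char) (s : List Char) : 0 ≤ pvFirst c s ∨ pvFirst c s = -1 := by
  induction s with
  | nil => simp [pvFirst]
  | cons a t ih => simp only [pvFirst]; split_ifs <;> omega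

lemma pvLast_cases (c : Char) (s : List Char) : 0 ≤ pvLast c s ∨ pvLast c s = -1 := by
  induction s with
  | nil => simp [pvLast]
  | cons a t ih => simp only [pvLast]; split_ifs <;> omega

lemma pvFindGo (c : Char) (s : List Char) : ∀ k : Nat,
    PySem.Chars.find.go [c] s k = if 0 ≤ pvFirst c s then pvFirst c s + k else -1 := by
  induction s with
  | nil => intro k; simp [PySem.Chars.find.go, pvFirst]
  | cons a t ih =>
    intro k
    by_cases hac : a = c
    · subst hac
      simp [PySem.Chars.find.go, List.isPrefixOf, pvFirst]
    · have hca : (c == a) = false := by simp [Ne.symm hac]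
      simp only [PySem.Chars.find.go, List.isPrefixOf, hca, Bool.and_true]
      rw [ih (k + 1)]
      simp only [pvFirst, if_neg hac]
      split_ifs <;> first | (push_cast; omega) | simp_all

lemma pvFind_eq (c : Char) (s : List Char) : PySem.Chars.find s [c] = pvFirst c s := by
  have h := pvFindGo c s 0
  simp only [Nat.cast_zero, add_zero] at h
  rw [PySem.Chars.find, h]
  rcases pvFirst_cases c s with h0 | h0
  · rw [if_pos h0]
  · rw [h0]; norm_num

lemma pvLast_snoc (c a : Char) (xs : List Char) :
    pvLast c (xs ++ [a]) = if a = c then (xs.length : Int) else pvLast c xs := by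
  induction xs with
  | nil =>
    simp only [List.nil_append, pvLast, List.length_nil]
    split_ifs <;> simp_all
  | cons b t ih =>
    simp only [List.cons_append, pvLast, ih, List.length_cons]
    have h0 := pvLast_cases c t
    split_ifs <;> push_cast <;> omega

lemma pvRfindGo (c : Char) (s : List Char) : ∀ k : Nat,
    PySem.Chars.rfind.go s [c] k = pvLast c (s.take (k + 1)) := by
  intro k
  induction k with
  | zero =>
    have hgo0 : PySem.Chars.rfind.go s [c] 0 = if [c].isPrefixOf s then (0 : Int) else -1 := by
      simp [PySem.Chars.rfind.go]
    cases s with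
    | nil => simp [hgo0, List.isPrefixOf, pvLast]
    | cons a t =>
      by_cases hac : a = c
      · subst hac; simp [hgo0, List.isPrefixOf, pvLast]
      · have hca : (c == a) = false := by simp [Ne.symm hac]
        simp [hgo0, List.isPrefixOf, hca, pvLast, hac]
  | succ j ih =>
    have hgoS : PySem.Chars.rfind.go s [c] (j + 1)
        = if [c].isPrefixOf (s.drop (j + 1)) then ((j + 1 : Nat) : Int)
          else PySem.Chars.rfind.go s [c] j := by
      simp [PySem.Chars.rfind.go]
    by_cases hlt : j + 1 < s.length
    · have hdrop : s[j+1] :: s.drop (j + 2) = s.drop (j + 1) := List.getElem_cons_drop hlt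
      have htake : s.take (j + 2) = s.take (j + 1) ++ [s[j+1]] := by
        rw [List.take_add_one]
        simp [List.getElem?_eq_getElem hlt]
      rw [hgoS, htake, pvLast_snoc, ih, ← hdrop]
      have hlen : (s.take (j + 1)).length = j + 1 := by
        simp [List.length_take, Nat.min_eq_left (by omega : j + 1 ≤ s.length)]
      by_cases hc : s[j+1] = c
      · have hcb : (c == s[j+1]) = true := by simp [hc]
        simp [List.isPrefixOf, hcb, hc, hlen]
      · have hcb : (c == s[j+1]) = false := by simp [Ne.symm hc]
        simp [List.isPrefixOf, hcb, hc]
    · have hle : s.length ≤ j + 1 := by omega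
      have hdrop : s.drop (j + 1) = [] := List.drop_eq_nil_of_le hle
      have h2 : s.take (j + 2) = s := List.take_of_length_le (by omega)
      have h1 : s.take (j + 1) = s := List.take_of_length_le hle
      rw [hgoS, hdrop, ih, h1, h2]
      simp [List.isPrefixOf]

lemma pvRfind_eq (c : Char) (s : List Char) : PySem.Chars.rfind s [c] = pvLast c s := by
  rw [PySem.Chars.rfind, pvRfindGo, List.take_of_length_le (by omega)]

lemma pvFirst_spec (c : Char) : ∀ s : List Char, 0 ≤ pvFirst c s →
    ∃ p q, s = p ++ c :: q ∧ pvFirst c s = p.length ∧ c ∉ p := by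
  intro s
  induction s with
  | nil => simp [pvFirst]
  | cons a t ih =>
    intro h
    by_cases hac : a = c
    · subst hac
      exact ⟨[], t, rfl, by simp [pvFirst], by simp⟩
    · simp only [pvFirst, if_neg hac] at h ⊢
      have ht : 0 ≤ pvFirst c t := by by_contra hc; simp [if_neg hc] at h
      obtain ⟨p, q, hs, hv, hm⟩ := ih ht
      refine ⟨a :: p, q, by simp [hs], by simp [if_pos ht, hv], ?_⟩
      simp only [List.mem_cons, not_or]
      exact ⟨Ne.symm hac, hm⟩

lemma pvLast_neg (c : Char) (s : List Char) : pvLast c s < 0 ↔ c ∉ s := by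
  induction s with
  | nil => simp [pvLast]
  | cons a t ih =>
    rcases pvLast_cases c t with h | h
    · have hmem : c ∈ t := by
        by_contra hc
        exact absurd (ih.mpr hc) (by omega)
      simp only [pvLast, if_pos h, List.mem_cons]
      constructor
      · intro hlt; omega
      · intro hno; exact absurd hmem (by tauto)
    · have hct : c ∉ t := ih.mp (by omega)
      simp only [pvLast, h, List.mem_cons]
      norm_num
      split_ifs with hac
      · constructor
        · intro hlt; omega
        · intro hno; exact absurd hac.symm (by tauto)
      · constructor
        · intro _; exact ⟨fun hh => hac hh.symm, hct⟩
        · intro _; omega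

lemma pvLast_spec (c : Char) : ∀ s : List Char, 0 ≤ pvLast c s →
    ∃ p q, s = p ++ c :: q ∧ pvLast c s = p.length ∧ c ∉ q := by
  intro s
  induction s with
  | nil => simp [pvLast]
  | cons a t ih =>
    intro h
    by_cases ht : 0 ≤ pvLast c t
    · obtain ⟨p, q, hs, hv, hm⟩ := ih ht
      exact ⟨a :: p, q, by simp [hs], by simp [pvLast, if_pos ht, hv], hm⟩
    · have hac : a = c := by
        by_contra hac
        simp [pvLast, if_neg ht, if_neg hac] at h
      refine ⟨[], t, by simp [hac], by simp [pvLast, if_neg ht, hac], ?_⟩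
      exact (pvLast_neg c t).mp (by omega)

-- A's recursive call strictly shrinks the string (cited by the port's decreasing_by)
lemma pvShrink (s : List Char)
    (h0 : 0 ≤ PySem.Chars.find s ['['])
    (h1 : 0 ≤ PySem.Chars.rfind s [']'])
    (h2 : PySem.Chars.rfind s [']'] - PySem.Chars.find s ['['] > 1) :
    (PySem.Chars.slice s none (some (PySem.Chars.find s ['['] + 1))
      ++ PySem.Chars.slice s (some (PySem.Chars.rfind s [']'])) none).length < s.length := by
  rw [pvFind_eq] at h0 h2 ⊢
  rw [pvRfind_eq] at h1 h2 ⊢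
  obtain ⟨p, q, hs1, hv1, -⟩ := pvFirst_spec '[' s h0
  obtain ⟨u, v, hs2, hv2, -⟩ := pvLast_spec ']' s h1
  have hlp : p.length < s.length := by rw [hs1]; simp
  have hlu : u.length < s.length := by rw [hs2]; simp
  rw [hv1, hv2] at h2 ⊢
  simp only [PySem.Chars.slice_eq_listSlice]
  rw [show ((p.length : Int) + 1) = ((p.length + 1 : Nat) : Int) by push_cast; ring]
  rw [PySem.List.slice_to_natCast, PySem.List.slice_from_natCast]
  simp only [List.length_append, List.length_take, List.length_drop]
  omega

-- ===== PORT A =====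
def pvGetA (s : List Char) : List Char :=
  if s = ['b', 'i', 't'] then ['i', 'n', 't', '3', '2', ':', 'b', 'i', 't', '(', ')']
  else
    let index_l := PySem.Chars.find s ['[']
    let index_r := PySem.Chars.rfind s [']']
    if h : index_l ≥ 0 ∧ index_r ≥ 0 ∧ index_r - index_l > 1 then
      pvGetA (PySem.Chars.slice s none (some (index_l + 1))
        ++ PySem.Chars.slice s (some index_r) none)
    else s
termination_by s.length
decreasing_by exact pvShrink s h.1 h.2.1 h.2.2

def get_data_type_real (data_type : String) : String :=
  String.ofList (pvGetA data_type.toList)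

-- ===== PORT B =====
-- loop body: update (first '[' index, last ']' index) with the enumerated pair (i, ch)
def pvStepB (p : Int × Int) (ic : Int × Char) : Int × Int :=
  ((if ic.2 = '[' ∧ p.1 < 0 then ic.1 else p.1), (if ic.2 = ']' then ic.1 else p.2))

def pvGetB (s : List Char) : List Char :=
  if s = ['b', 'i', 't'] then ['i', 'n', 't', '3', '2', ':', 'b', 'i', 't', '(', ')']
  else
    let lr := (PySem.List.enumerate s).foldl pvStepB (-1, -1)
    if lr.1 ≥ 0 ∧ lr.2 - lr.1 > 1 then
      PySem.Chars.slice s none (some (lr.1 + 1)) ++ PySem.Chars.slice s (some lr.2) none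
    else s

def get_data_type_real_alt (data_type : String) : String :=
  String.ofList (pvGetB data_type.toList)

-- ===== PRECONDITION & SPEC =====
def Spec_get_data_type_real (data_type : String) (out : String) : Prop := out = get_data_type_real_alt data_type
instance (data_type : String) (out : String) : Decidable (Spec_get_data_type_real data_type out) := by unfold Spec_get_data_type_real; infer_instance

-- ===== CLAIM (what is proved, stated in full; the proofs are below) =====
def Claim_equal_get_data_type_real : Prop := ∀ (data_type : String), Dom_get_data_type_real data_type → Spec_get_data_type_real data_type (get_data_type_real data_type)

-- ===== LEMMAS AND PROOFS =====

-- B's scan computes exactly (pvFirst '[', pvLast ']') (offset k, arbitrary accumulator)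
lemma pvFoldB (s : List Char) : ∀ (k l0 r0 : Int), 0 ≤ k →
    (PySem.List.enumerate s k).foldl pvStepB (l0, r0) =
      ((if 0 ≤ l0 then l0 else if 0 ≤ pvFirst '[' s then pvFirst '[' s + k else l0),
       (if 0 ≤ pvLast ']' s then pvLast ']' s + k else r0)) := by
  induction s with
  | nil => intro k l0 r0 hk; simp [PySem.List.enumerate_nil, pvFirst, pvLast]
  | cons a t ih =>
    intro k l0 r0 hk
    rw [PySem.List.enumerate_cons, List.foldl_cons]
    show (PySem.List.enumerate t (k + 1)).foldl pvStepB (pvStepB (l0, r0) (k, a)) = _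
    rw [show pvStepB (l0, r0) (k, a)
        = ((if a = '[' ∧ l0 < 0 then k else l0), (if a = ']' then k else r0)) from rfl]
    rw [ih (k + 1) _ _ (by omega)]
    by_cases ha1 : a = '[' <;> by_cases ha2 : a = ']'
    · exact absurd (ha1.symm.trans ha2) (by decide)
    · subst ha1
      simp only [pvFirst, pvLast, eq_self_iff_true, true_and, if_true, Prod.mk.injEq,
        if_neg (by decide : ¬(('[' : Char) = ']'))]
      refine ⟨?_, ?_⟩ <;> split_ifs <;> omega
    · subst ha2
      have e : ¬((']' : Char) = '[') := by decide
      rw [if_neg (show ¬((']' : Char) = '[' ∧ l0 < 0) from fun hh => e hh.1)]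
      simp only [pvFirst, pvLast, eq_self_iff_true, if_true, Prod.mk.injEq, if_neg e]
      refine ⟨?_, ?_⟩ <;> split_ifs <;> omega
    · rw [if_neg (show ¬(a = '[' ∧ l0 < 0) from fun hh => ha1 hh.1), if_neg ha2]
      simp only [pvFirst, pvLast, Prod.mk.injEq, if_neg ha1, if_neg ha2]
      refine ⟨?_, ?_⟩ <;> split_ifs <;> omega

lemma pvFirst_append_not_mem (c : Char) (p q : List Char) (h : c ∉ p) :
    pvFirst c (p ++ c :: q) = p.length := by
  induction p with
  | nil => simp [pvFirst]
  | cons a t ihp =>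
    simp only [List.mem_cons, not_or] at h
    have hne : a ≠ c := fun hh => h.1 hh.symm
    have := ihp h.2
    simp only [List.cons_append, pvFirst, if_neg hne, this, List.length_cons]
    rw [if_pos (by omega)]
    push_cast; ring

lemma pvLast_append_not_mem (c : Char) (p q : List Char) (h : c ∉ q) :
    pvLast c (p ++ c :: q) = p.length := by
  induction p with
  | nil => simp [pvLast, (pvLast_neg c q).mpr h]
  | cons a t ihp =>
    simp only [List.cons_append, pvLast, ihp, List.length_cons]
    rw [if_pos (by omega)]
    push_cast; ring

-- after one collapse the string has '[' first at pvFirst and ']' last right after it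
lemma pvCollapsed (s : List Char)
    (hf : 0 ≤ pvFirst '[' s) (hl : pvLast ']' s - pvFirst '[' s > 1) :
    pvFirst '[' (PySem.Chars.slice s none (some (pvFirst '[' s + 1))
        ++ PySem.Chars.slice s (some (pvLast ']' s)) none) = pvFirst '[' s
    ∧ pvLast ']' (PySem.Chars.slice s none (some (pvFirst '[' s + 1))
        ++ PySem.Chars.slice s (some (pvLast ']' s)) none) = pvFirst '[' s + 1
    ∧ '[' ∈ (PySem.Chars.slice s none (some (pvFirst '[' s + 1))
        ++ PySem.Chars.slice s (some (pvLast ']' s)) none) := by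
  obtain ⟨p, q, hs1, hv1, hm1⟩ := pvFirst_spec '[' s hf
  obtain ⟨u, v, hs2, hv2, hm2⟩ := pvLast_spec ']' s (by omega)
  simp only [PySem.Chars.slice_eq_listSlice, hv1, hv2]
  rw [show ((p.length : Int) + 1) = ((p.length + 1 : Nat) : Int) by push_cast; ring]
  rw [PySem.List.slice_to_natCast, PySem.List.slice_from_natCast]
  have htake : s.take (p.length + 1) = p ++ ['['] := by
    rw [show s = (p ++ ['[']) ++ q by simp [hs1]]
    exact List.take_left' (by simp)
  have hdrop : s.drop u.length = ']' :: v := by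
    rw [hs2]; exact List.drop_left' rfl
  rw [htake, hdrop]
  refine ⟨?_, ?_, ?_⟩
  · rw [List.append_assoc, List.singleton_append,
      pvFirst_append_not_mem '[' p (']' :: v) hm1]
  · rw [pvLast_append_not_mem ']' (p ++ ['[']) v hm2]
    simp
  · simp

lemma pvMain (s : List Char) : pvGetA s = pvGetB s := by
  by_cases hbit : s = ['b', 'i', 't']
  · rw [pvGetA.eq_def]
    simp only [pvGetB, if_pos hbit]
  · have hB : pvGetB s
        = if 0 ≤ pvFirst '[' s ∧ pvLast ']' s - pvFirst '[' s > 1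
          then PySem.Chars.slice s none (some (pvFirst '[' s + 1))
            ++ PySem.Chars.slice s (some (pvLast ']' s)) none
          else s := by
      simp only [pvGetB, if_neg hbit, pvFoldB s 0 (-1) (-1) le_rfl]
      rcases pvFirst_cases '[' s with hf | hf <;> rcases pvLast_cases ']' s with hr | hr <;>
        simp only [hf, hr, if_pos, if_neg] <;> norm_num [hf, hr] <;>
        split_ifs <;> first | rfl | omega
    rw [hB, pvGetA.eq_def]
    simp only [if_neg hbit, pvFind_eq, pvRfind_eq]
    by_cases hg : 0 ≤ pvFirst '[' s ∧ pvLast ']' s - pvFirst '[' s > 1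
    · rw [if_pos hg, dif_pos ⟨hg.1, by omega, hg.2⟩]
      obtain ⟨h1, h2, h3⟩ := pvCollapsed s hg.1 hg.2
      rw [pvGetA.eq_def]
      have hnb : ¬(PySem.Chars.slice s none (some (pvFirst '[' s + 1))
          ++ PySem.Chars.slice s (some (pvLast ']' s)) none = ['b', 'i', 't']) := by
        intro he
        rw [he] at h3
        exact absurd h3 (by decide)
      rw [if_neg hnb]
      simp only [pvFind_eq, pvRfind_eq, h1, h2]
      rw [dif_neg (by omega)]
    · rw [if_neg hg, dif_neg (fun hA => hg ⟨hA.1, hA.2.2⟩)]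

-- ===== VERDICT (by name: the statement is the Claim_ definition above) =====
theorem get_data_type_real_spec : Claim_equal_get_data_type_real := by
  intro s _
  unfold Spec_get_data_type_real get_data_type_real get_data_type_real_alt
  rw [pvMain]
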